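-- pv_equiv track=rewrite | github.com/SysBioInra/RBApy | rba/prerba/macromolecule.py | composition
-- ===== SOURCE A (Python) =====
-- def composition(sequence, alphabet):
--     """Compute composition of sequence with given alphabet."""
--     comp = dict.fromkeys(alphabet, 0)
--     for n in sequence:
--         try:
--             comp[n] += 1
--         except KeyError:
--             pass
--     return comp
-- ===== SOURCE B (Python) =====
-- def composition(sequence, alphabet):
--     """Compute composition of sequence with given alphabet."""
--     return {k: sum(1 for ch in sequence if ch == k) for k in alphabet}
-- ===== Notes on version B (the rewrite author's own statement) =====
-- stated objective: simpler
-- what changed: B drops the accumulating dict entirely: for each alphabet key it counts matching characters with an inner scan of the sequence (outer loop over alphabet, inner over sequence), the transpose of A's single guarded-increment pass into an alphabet-seeded dict.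
import Mathlib
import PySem

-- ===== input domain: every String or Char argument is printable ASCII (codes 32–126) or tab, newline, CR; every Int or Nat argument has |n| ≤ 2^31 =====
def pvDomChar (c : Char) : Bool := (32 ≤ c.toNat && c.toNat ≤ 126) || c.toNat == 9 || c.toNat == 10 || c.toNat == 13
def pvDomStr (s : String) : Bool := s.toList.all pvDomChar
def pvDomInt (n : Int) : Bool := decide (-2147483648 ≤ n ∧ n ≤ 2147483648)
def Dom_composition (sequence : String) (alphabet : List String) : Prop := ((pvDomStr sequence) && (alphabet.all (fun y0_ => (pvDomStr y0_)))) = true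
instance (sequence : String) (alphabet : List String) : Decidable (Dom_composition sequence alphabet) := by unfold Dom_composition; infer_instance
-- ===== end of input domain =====

-- B drops the accumulating dict: per alphabet key it counts matching characters by an inner
-- scan of the sequence (the transpose of A's single pass); simpler, not faster.

-- ===== PORT A =====
-- comp = dict.fromkeys(alphabet, 0); for n in sequence: try comp[n] += 1 except KeyError: pass
def composition (sequence : String) (alphabet : List String) : List (String × Int) :=
  let comp : PySem.Dict String Int :=
    alphabet.foldl (fun d k => d.insert k 0) PySem.Dict.empty
  (sequence.toList.foldl
    (fun d n =>
      if d.contains (String.mk [n]) then d.modify (String.mk [n]) 0 (· + 1) else d)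
    comp).items

-- ===== PORT B =====
-- return {k: sum(1 for ch in sequence if ch == k) for k in alphabet}
def composition_alt (sequence : String) (alphabet : List String) : List (String × Int) :=
  (alphabet.foldl
    (fun d k =>
      d.insert k
        (sequence.toList.foldl
          (fun acc ch => if String.mk [ch] == k then acc + 1 else acc) (0 : Int)))
    PySem.Dict.empty).items

-- ===== PRECONDITION & SPEC =====
def Spec_composition (sequence : String) (alphabet : List String) (out : List (String × Int)) : Prop := out = composition_alt sequence alphabet
instance (sequence : String) (alphabet : List String) (out : List (String × Int)) : Decidable (Spec_composition sequence alphabet out) := by unfold Spec_composition; infer_instance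

-- ===== CLAIM (what is proved, stated in full; the proofs are below) =====
def Claim_equal_composition : Prop := ∀ (sequence : String) (alphabet : List String), Dom_composition sequence alphabet → Spec_composition sequence alphabet (composition sequence alphabet)

-- ===== LEMMAS AND PROOFS =====

-- a dict with Nodup keys is determined by its keys and getD
theorem items_eq_keys_map {d : PySem.Dict String Int} (h : d.keys.Nodup) :
    d.items = d.keys.map (fun k => (k, d.getD k 0)) := by
  have hk : d.keys = d.items.map (·.1) := by simp [PySem.Dict.keys]
  rw [hk, List.map_map]
  conv_lhs => rw [← List.map_id d.items]
  refine List.map_congr_left ?_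
  rintro ⟨k, v⟩ hm
  simpa using (PySem.Dict.getD_of_mem_items d hm h 0).symm

-- getD through a foldl of inserts whose value does not depend on the accumulator
theorem getD_foldl_insert_const (l : List String) (g : String → Int)
    (d : PySem.Dict String Int) (x : String) :
    (l.foldl (fun d k => d.insert k (g k)) d).getD x 0
      = if x ∈ l then g x else d.getD x 0 := by
  induction l generalizing d with
  | nil => simp
  | cons k t ih =>
    simp only [List.foldl_cons, ih, PySem.Dict.getD_insert, List.mem_cons]
    by_cases hx : x ∈ t
    · simp [hx]
    · by_cases hk : x = k <;> simp [hx, hk]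

-- A's guarded loop: keys are unchanged
theorem keys_foldl_guarded (l : List String) (d : PySem.Dict String Int) :
    (l.foldl (fun d n => if d.contains n then d.modify n 0 (· + 1) else d) d).keys
      = d.keys := by
  induction l generalizing d with
  | nil => rfl
  | cons c t ih =>
    simp only [List.foldl_cons]
    by_cases hc : d.contains c = true
    · rw [hc, if_pos rfl, ih, PySem.Dict.keys_modify,
        PySem.Dict.keys_insert_of_contains _ _ hc]
    · rw [if_neg (by simp [hc]), ih]

-- each key already present gathers its count from the traversed list
theorem getD_foldl_guarded (l : List String) (x : String) :
    ∀ (d : PySem.Dict String Int), d.contains x = true →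
    (l.foldl (fun d n => if d.contains n then d.modify n 0 (· + 1) else d) d).getD x 0
      = d.getD x 0 + (l.count x : Int) := by
  induction l with
  | nil => intro d _; simp
  | cons c t ih =>
    intro d hx
    simp only [List.foldl_cons]
    by_cases hc : d.contains c = true
    · rw [hc, if_pos rfl,
        ih _ (by simp [PySem.Dict.contains_modify, hx]),
        PySem.Dict.getD_modify]
      by_cases hxc : x = c
      · subst hxc; simp; ring
      · simp [hxc, Ne.symm hxc]
    · rw [if_neg (by simp [hc]), ih _ hx]
      have hxc : x ≠ c := fun h => hc (h ▸ hx)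
      simp [Ne.symm hxc]

-- B's inner scan is the count of x in the list
theorem foldl_if_count (l : List String) (x : String) (acc : Int) :
    l.foldl (fun acc y => if y == x then acc + 1 else acc) acc
      = acc + (l.count x : Int) := by
  induction l generalizing acc with
  | nil => simp
  | cons c t ih =>
    simp only [List.foldl_cons, List.count_cons]
    by_cases hc : (c == x) = true
    · simp only [hc, if_true, ih]; push_cast; ring
    · simp only [hc, ih]; push_cast; ring

theorem composition_eq (sequence : String) (alphabet : List String) :
    composition sequence alphabet = composition_alt sequence alphabet := by
  unfold composition composition_alt
  have e1 : ∀ (d : PySem.Dict String Int),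
      List.foldl (fun (d : PySem.Dict String Int) n =>
        if d.contains (String.mk [n]) then d.modify (String.mk [n]) 0 (· + 1) else d)
        d sequence.toList
      = List.foldl (fun (d : PySem.Dict String Int) k => if d.contains k then d.modify k 0 (· + 1) else d)
        d (sequence.toList.map (fun c => String.mk [c])) :=
    fun d => (List.foldl_map (f := fun c => String.mk [c])
      (g := fun (d : PySem.Dict String Int) k => if d.contains k then d.modify k 0 (· + 1) else d)).symm
  have e2 : ∀ (k : String),
      List.foldl (fun (acc : Int) ch => if String.mk [ch] == k then acc + 1 else acc)
        (0 : Int) sequence.toList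
      = List.foldl (fun (acc : Int) y => if y == k then acc + 1 else acc)
        (0 : Int) (sequence.toList.map (fun c => String.mk [c])) :=
    fun k => (List.foldl_map (f := fun c => String.mk [c])
      (g := fun (acc : Int) y => if y == k then acc + 1 else acc)).symm
  simp only [e1, e2]
  set ls : List String := sequence.toList.map (fun c => String.mk [c]) with hls
  set comp : PySem.Dict String Int := alphabet.foldl (fun d k => (PySem.Dict.insert d k 0)) PySem.Dict.empty with hcomp
  set dA : PySem.Dict String Int := ls.foldl (fun d n => if d.contains n then d.modify n 0 (· + 1) else d) comp with hdA
  set dB : PySem.Dict String Int := alphabet.foldl (fun d k =>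
      PySem.Dict.insert d k (ls.foldl (fun acc y => if y == k then acc + 1 else acc) 0))
      PySem.Dict.empty with hdB
  -- keys
  have hkcomp : comp.keys = PySem.Set.ofList alphabet := by
    rw [hcomp, PySem.Dict.keys_foldl_insert (f := fun _ _ => 0)]
    simp [PySem.Set.update, PySem.Set.ofList_eq_foldl, PySem.Dict.keys_empty]
  have hkA : dA.keys = PySem.Set.ofList alphabet := by
    rw [hdA, keys_foldl_guarded, hkcomp]
  have hkB : dB.keys = PySem.Set.ofList alphabet := by
    rw [hdB, PySem.Dict.keys_foldl_insert
      (f := fun _ k => ls.foldl (fun acc y => if y == k then acc + 1 else acc) 0)]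
    simp [PySem.Set.update, PySem.Set.ofList_eq_foldl, PySem.Dict.keys_empty]
  have hnodup : (PySem.Set.ofList alphabet).Nodup := PySem.Set.nodup_ofList alphabet
  -- values at each key of the alphabet
  have hval : ∀ x ∈ alphabet, dA.getD x 0 = dB.getD x 0 := by
    intro x hx
    have hcontains : comp.contains x = true := by
      rw [PySem.Dict.contains_iff_mem_keys, hkcomp, PySem.Set.mem_ofList]; exact hx
    have hA : dA.getD x 0 = 0 + (ls.count x : Int) := by
      rw [hdA, getD_foldl_guarded ls x comp hcontains, hcomp,
        getD_foldl_insert_const alphabet (fun _ => 0) PySem.Dict.empty x]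
      simp
    have hB : dB.getD x 0 = (ls.count x : Int) := by
      rw [hdB, getD_foldl_insert_const alphabet
        (fun k => ls.foldl (fun acc y => if y == k then acc + 1 else acc) 0) _ x,
        if_pos hx, foldl_if_count]
      simp
    rw [hA, hB]; simp
  -- items from keys + values
  have hnA : dA.keys.Nodup := hkA ▸ hnodup
  have hnB : dB.keys.Nodup := hkB ▸ hnodup
  rw [items_eq_keys_map hnA, items_eq_keys_map hnB, hkA, hkB]
  refine List.map_congr_left ?_
  intro x hx
  have : x ∈ alphabet := (PySem.Set.mem_ofList alphabet x).1 hx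
  simp [hval x this]

-- ===== VERDICT (by name: the statement is the Claim_ definition above) =====
theorem composition_spec : Claim_equal_composition := by
  intro sequence alphabet _
  unfold Spec_composition
  exact composition_eq sequence alphabet
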